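-- pv_equiv track=rewrite | github.com/zdkano/parity-zero | reviewer/planner.py | infer_path_categories
-- ===== SOURCE A (Python) =====
-- def infer_path_categories(changed_paths: list[str]) -> set[str]:
--     """Infer likely finding categories from changed file paths.
--
--     This is a lightweight heuristic — it maps path segments to
--     the finding taxonomy categories to enable memory relevance matching.
--     """
--     categories: set[str] = set()
--     for path in changed_paths:
--         path_lower = path.lower()
--         segments = path_lower.split("/")
--
--         # Auth-related paths
--         if any(seg in ("auth", "login", "oauth", "session", "token",
--                         "permissions", "rbac", "acl") for seg in segments):
--             categories.add("authentication")
--             categories.add("authorization")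
--
--         # Config/settings paths
--         if any(seg in ("config", "settings", "deploy") for seg in segments):
--             categories.add("insecure_configuration")
--             categories.add("secrets")
--
--         # Security paths
--         if any(seg in ("security", "middleware") for seg in segments):
--             categories.add("authentication")
--             categories.add("authorization")
--
--         # Admin paths
--         if "admin" in segments:
--             categories.add("authorization")
--
--         # Dependency files
--         basename = path.split("/")[-1].lower() if "/" in path else path_lower
--         if basename in ("requirements.txt", "package.json", "go.mod",
--                         "cargo.toml", "gemfile", "pom.xml", "build.gradle",
--                         "composer.json"):
--             categories.add("dependency_risk")
--
--     return categories
-- ===== SOURCE B (Python) =====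
-- # Different algorithm: a keyword -> bitmask index; one single pass per path ORs
-- # segment masks into one integer, then the bits are decoded into categories in
-- # rule order.  A's four separate any()-scans over the segments disappear.
-- _KEYWORD_BIT = {
--     "auth": 1, "login": 1, "oauth": 1, "session": 1, "token": 1,
--     "permissions": 1, "rbac": 1, "acl": 1,
--     "config": 2, "settings": 2, "deploy": 2,
--     "security": 4, "middleware": 4,
--     "admin": 8,
-- }
--
-- _DEP_BASENAMES = {"requirements.txt", "package.json", "go.mod", "cargo.toml",
--                   "gemfile", "pom.xml", "build.gradle", "composer.json"}
--
-- _BIT_CATEGORIES = (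
--     (1, ("authentication", "authorization")),
--     (2, ("insecure_configuration", "secrets")),
--     (4, ("authentication", "authorization")),
--     (8, ("authorization",)),
--     (16, ("dependency_risk",)),
-- )
--
--
-- def infer_path_categories(changed_paths: list[str]) -> set[str]:
--     categories: set[str] = set()
--     for path in changed_paths:
--         segments = path.lower().split("/")
--         mask = 0
--         for seg in segments:
--             mask |= _KEYWORD_BIT.get(seg, 0)
--         if segments[-1] in _DEP_BASENAMES:
--             mask |= 16
--         for bit, cats in _BIT_CATEGORIES:
--             if mask & bit:
--                 categories.update(cats)
--     return categories
-- ===== Notes on version B (the rewrite author's own statement) =====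
-- stated objective: faster
-- what changed: Replaces A's four separate any()-scans over the segments by a keyword->bitmask dictionary index: one single pass per path ORs per-segment masks into one integer (plus one bit for the dependency basename, taken as segments[-1] of the lowered split), and a final decode loop turns set bits into categories in rule order.
import Mathlib
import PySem

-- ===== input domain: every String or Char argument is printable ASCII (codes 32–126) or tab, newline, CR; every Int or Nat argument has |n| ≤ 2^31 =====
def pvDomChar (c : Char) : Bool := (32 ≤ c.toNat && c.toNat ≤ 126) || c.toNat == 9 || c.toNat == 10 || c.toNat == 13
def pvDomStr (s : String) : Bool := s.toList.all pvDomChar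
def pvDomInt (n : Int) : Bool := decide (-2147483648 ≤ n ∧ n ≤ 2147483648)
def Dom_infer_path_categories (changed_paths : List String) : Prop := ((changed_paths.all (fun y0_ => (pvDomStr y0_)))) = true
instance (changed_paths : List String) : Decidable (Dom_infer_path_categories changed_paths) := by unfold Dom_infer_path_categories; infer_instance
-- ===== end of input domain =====

-- B replaces A's four any()-scans per path by a keyword→bitmask dictionary index: one pass
-- per path ORs segment masks into an integer, then a decode loop turns bits into categories.

-- ===== PORT A =====
def pvAuthKeys : List String :=
  ["auth", "login", "oauth", "session", "token", "permissions", "rbac", "acl"]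
def pvCfgKeys : List String := ["config", "settings", "deploy"]
def pvSecKeys : List String := ["security", "middleware"]
def pvDepFiles : List String :=
  ["requirements.txt", "package.json", "go.mod", "cargo.toml", "gemfile", "pom.xml",
   "build.gradle", "composer.json"]

def infer_path_categories (changed_paths : List String) : List String :=
  changed_paths.foldl (fun categories path =>
    let path_lower := PySem.Str.lower path
    -- "/" is non-empty, so split? is always `some`; the getD [] default is never used
    let segments := (PySem.Str.split? path_lower "/").getD []
    let categories := if segments.any (fun seg => pvAuthKeys.contains seg) then
        PySem.Set.add (PySem.Set.add categories "authentication") "authorization"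
      else categories
    let categories := if segments.any (fun seg => pvCfgKeys.contains seg) then
        PySem.Set.add (PySem.Set.add categories "insecure_configuration") "secrets"
      else categories
    let categories := if segments.any (fun seg => pvSecKeys.contains seg) then
        PySem.Set.add (PySem.Set.add categories "authentication") "authorization"
      else categories
    let categories := if segments.contains "admin" then
        PySem.Set.add categories "authorization"
      else categories
    -- path.split("/") is never empty, so [-1] never raises; getD "" is never used
    let basename := if PySem.Str.isIn "/" path then
        PySem.Str.lower ((PySem.List.pyGet? ((PySem.Str.split? path "/").getD []) (-1)).getD "")
      else path_lower
    if pvDepFiles.contains basename then PySem.Set.add categories "dependency_risk"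
    else categories) PySem.Set.empty

-- ===== PORT B =====
-- every int in Source B's mask computation is a nonnegative bitmask, so Nat's ||| / &&& are
-- exact for Python's | / & here
def altKeywordBit : PySem.Dict String Nat :=
  PySem.Dict.ofList
    [("auth", 1), ("login", 1), ("oauth", 1), ("session", 1), ("token", 1),
     ("permissions", 1), ("rbac", 1), ("acl", 1),
     ("config", 2), ("settings", 2), ("deploy", 2),
     ("security", 4), ("middleware", 4),
     ("admin", 8)]

def altDepBasenames : PySem.Set String :=
  PySem.Set.ofList ["requirements.txt", "package.json", "go.mod", "cargo.toml", "gemfile",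
                    "pom.xml", "build.gradle", "composer.json"]

def altBitCategories : List (Nat × List String) :=
  [ (1, ["authentication", "authorization"]),
    (2, ["insecure_configuration", "secrets"]),
    (4, ["authentication", "authorization"]),
    (8, ["authorization"]),
    (16, ["dependency_risk"]) ]

def infer_path_categories_alt (changed_paths : List String) : List String :=
  changed_paths.foldl (fun categories path =>
    -- "/" is non-empty, so split? is always `some`; the getD [] default is never used
    let segments := (PySem.Str.split? (PySem.Str.lower path) "/").getD []
    let mask := segments.foldl (fun m seg => m ||| PySem.Dict.getD altKeywordBit seg 0) 0
    -- split never returns an empty list, so segments[-1] never raises; getD "" is never used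
    let mask := if PySem.Set.contains altDepBasenames
        ((PySem.List.pyGet? segments (-1)).getD "") then mask ||| 16 else mask
    altBitCategories.foldl (fun cats r =>
      if mask &&& r.1 ≠ 0 then PySem.Set.update cats r.2 else cats) categories)
    PySem.Set.empty

-- ===== PRECONDITION & SPEC =====
def Spec_infer_path_categories (changed_paths : List String) (out : List String) : Prop := out = infer_path_categories_alt changed_paths
instance (changed_paths : List String) (out : List String) : Decidable (Spec_infer_path_categories changed_paths out) := by unfold Spec_infer_path_categories; infer_instance

-- ===== CLAIM (what is proved, stated in full; the proofs are below) =====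
def Claim_equal_infer_path_categories : Prop := ∀ (changed_paths : List String), Dom_infer_path_categories changed_paths → Spec_infer_path_categories changed_paths (infer_path_categories changed_paths)

-- ===== LEMMAS AND PROOFS =====

-- lower() touches only uppercase ASCII letters, so it maps a char to '/' only from '/'
theorem pvLowerChar_eq_slash_iff (c : Char) : PySem.Chars.lowerChar c = '/' ↔ c = '/' := by
  unfold PySem.Chars.lowerChar PySem.Chars.isupper
  split_ifs with h
  · simp only [Bool.and_eq_true, decide_eq_true_eq] at h
    constructor
    · intro hc
      exfalso
      have h1 : 65 ≤ c.toNat := h.1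
      have h2 : c.toNat ≤ 90 := h.2
      obtain ⟨n, hn⟩ : ∃ n, n = c.toNat := ⟨_, rfl⟩
      rw [← hn] at hc h1 h2
      interval_cases n <;> exact absurd hc (by decide)
    · intro hc
      subst hc
      exact absurd h.1 (by decide)
  · simp

-- splitOn.go on sep "/" commutes with lower() (as '/' is fixed by lowerChar)
theorem pvGo_map (fuel : Nat) (l cur : List Char) (acc : List (List Char)) :
    PySem.Chars.splitOn.go ['/'] fuel (l.map PySem.Chars.lowerChar)
      (cur.map PySem.Chars.lowerChar) (acc.map (List.map PySem.Chars.lowerChar)) =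
    (PySem.Chars.splitOn.go ['/'] fuel l cur acc).map (List.map PySem.Chars.lowerChar) := by
  induction fuel generalizing l cur acc with
  | zero =>
    simp [PySem.Chars.splitOn.go]
  | succ n ih =>
    cases l with
    | nil => simp [PySem.Chars.splitOn.go]
    | cons c rest =>
      by_cases hc : c = '/'
      · subst hc
        simp only [List.map_cons]
        rw [show PySem.Chars.lowerChar '/' = '/' from by decide]
        simp only [PySem.Chars.splitOn.go, List.isPrefixOf, Bool.and_true,
          BEq.rfl, if_true, List.length_cons, List.length_nil, List.drop_succ_cons,
          List.drop_zero]
        have := ih rest [] (cur.reverse :: acc)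
        simp only [List.map_cons, List.map_nil, List.map_reverse] at this
        exact this
      · have hl : ('/' == PySem.Chars.lowerChar c) = false := by
          simp only [beq_eq_false_iff_ne, ne_eq]
          exact fun hx => hc ((pvLowerChar_eq_slash_iff c).mp hx.symm)
        have hr : ('/' == c) = false := by
          simp only [beq_eq_false_iff_ne, ne_eq]
          exact fun hx => hc hx.symm
        simp only [List.map_cons, PySem.Chars.splitOn.go, List.isPrefixOf, Bool.and_true,
          hl, hr, Bool.false_eq_true, if_false]
        have := ih rest (c :: cur) acc
        simp only [List.map_cons] at this
        exact this

-- splitOn.go on a list without '/' never splits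
theorem pvGo_no_slash (fuel : Nat) (l cur : List Char) (acc : List (List Char))
    (h : '/' ∉ l) :
    PySem.Chars.splitOn.go ['/'] fuel l cur acc = ((cur.reverse ++ l) :: acc).reverse := by
  induction fuel generalizing l cur acc with
  | zero => simp [PySem.Chars.splitOn.go]
  | succ n ih =>
    cases l with
    | nil => simp [PySem.Chars.splitOn.go]
    | cons c rest =>
      have hc : ('/' == c) = false := by
        simp only [beq_eq_false_iff_ne, ne_eq]
        intro hx
        exact h (hx ▸ List.mem_cons_self)
      simp only [PySem.Chars.splitOn.go, List.isPrefixOf, Bool.and_true, hc,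
        Bool.false_eq_true, if_false]
      rw [ih rest (c :: cur) acc (fun hm => h (List.mem_cons_of_mem _ hm))]
      simp

theorem pvSplitOn_lower (s : List Char) :
    PySem.Chars.splitOn (PySem.Chars.lower s) ['/'] =
      (PySem.Chars.splitOn s ['/']).map (List.map PySem.Chars.lowerChar) := by
  unfold PySem.Chars.splitOn PySem.Chars.lower
  rw [List.length_map]
  exact pvGo_map (s.length + 1) s [] []

theorem pvSplitOn_no_slash (s : List Char) (h : '/' ∉ s) :
    PySem.Chars.splitOn s ['/'] = [s] := by
  unfold PySem.Chars.splitOn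
  rw [pvGo_no_slash _ _ _ _ h]
  simp

-- String-level: splitting the lowered path = lowering each piece of the split path
theorem pvSplit_lower (path : String) :
    (PySem.Str.split? (PySem.Str.lower path) "/").getD [] =
      ((PySem.Str.split? path "/").getD []).map PySem.Str.lower := by
  have hsl : ("/" : String).toList = ['/'] := by decide
  simp only [PySem.Str.split?, PySem.Chars.split?, PySem.Str.toList_lower, hsl,
    List.isEmpty_cons, Bool.false_eq_true, if_false, Option.map_some, Option.getD_some]
  rw [pvSplitOn_lower, List.map_map, List.map_map]
  apply List.map_congr_left
  intro cs _
  simp [Function.comp, PySem.Str.lower, PySem.Chars.lower]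

-- pyGet? commutes with map
theorem pvPyGet?_map {α β : Type} (f : α → β) (xs : List α) (i : Int) :
    PySem.List.pyGet? (xs.map f) i = (PySem.List.pyGet? xs i).map f := by
  simp only [PySem.List.pyGet?, PySem.List.pyIdx?, List.length_map]
  split_ifs <;> simp

-- B's basename (last segment of the lowered split) = A's conditional basename
theorem pvBase_eq (path : String) :
    (PySem.List.pyGet? ((PySem.Str.split? (PySem.Str.lower path) "/").getD []) (-1)).getD "" =
      (if PySem.Str.isIn "/" path then
        PySem.Str.lower ((PySem.List.pyGet? ((PySem.Str.split? path "/").getD []) (-1)).getD "")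
      else PySem.Str.lower path) := by
  rw [pvSplit_lower, pvPyGet?_map]
  rcases hin : PySem.Str.isIn "/" path with _ | _
  · have hns : '/' ∉ path.toList := by
      intro hm
      have h2 : PySem.Str.isIn "/" path = true := by
        rw [PySem.Str.isIn]
        rw [show ("/" : String).toList = ['/'] from by decide]
        exact (PySem.Chars.isIn_iff_infix _ _).mpr ((List.singleton_infix_iff _ _).mpr hm)
      rw [hin] at h2
      simp at h2
    have hsp : PySem.Str.split? path "/" = some [path] := by
      simp only [PySem.Str.split?, show ("/" : String).toList = ['/'] from by decide,
        PySem.Chars.split?, List.isEmpty_cons, Bool.false_eq_true, if_false]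
      rw [pvSplitOn_no_slash _ hns]
      simp
    rw [hsp]
    simp only [Option.getD_some]
    have hg : PySem.List.pyGet? [path] (-1) = some path := by
      simp [PySem.List.pyGet?, PySem.List.pyIdx?]
    rw [hg]
    simp
  · rcases hg : PySem.List.pyGet? ((PySem.Str.split? path "/").getD []) (-1) with _ | b
    · simp only [Option.map_none, Option.getD_none, if_pos]
      decide
    · simp

-- the two dependency-file tables are the same list
theorem pvDep_eq (b : String) : PySem.Set.contains altDepBasenames b = pvDepFiles.contains b := by
  have h : altDepBasenames = pvDepFiles := by
    unfold altDepBasenames pvDepFiles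
    exact PySem.Set.ofList_eq_self_of_nodup _ (by decide)
  rw [h]
  rfl

-- evaluating the ofList inserts (all keys distinct) gives the literal association list
theorem pvKwMk : altKeywordBit = PySem.Dict.mk
    [("auth", 1), ("login", 1), ("oauth", 1), ("session", 1), ("token", 1),
     ("permissions", 1), ("rbac", 1), ("acl", 1),
     ("config", 2), ("settings", 2), ("deploy", 2),
     ("security", 4), ("middleware", 4),
     ("admin", 8)] := by decide

-- closed form of the keyword→bitmask lookup
theorem pvKwBit_eq (seg : String) :
    PySem.Dict.getD altKeywordBit seg 0 =
      if pvAuthKeys.contains seg then 1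
      else if pvCfgKeys.contains seg then 2
      else if pvSecKeys.contains seg then 4
      else if seg == "admin" then 8 else 0 := by
  rw [pvKwMk]
  by_cases h1 : seg = "auth"; · subst h1; decide
  by_cases h2 : seg = "login"; · subst h2; decide
  by_cases h3 : seg = "oauth"; · subst h3; decide
  by_cases h4 : seg = "session"; · subst h4; decide
  by_cases h5 : seg = "token"; · subst h5; decide
  by_cases h6 : seg = "permissions"; · subst h6; decide
  by_cases h7 : seg = "rbac"; · subst h7; decide
  by_cases h8 : seg = "acl"; · subst h8; decide
  by_cases h9 : seg = "config"; · subst h9; decide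
  by_cases h10 : seg = "settings"; · subst h10; decide
  by_cases h11 : seg = "deploy"; · subst h11; decide
  by_cases h12 : seg = "security"; · subst h12; decide
  by_cases h13 : seg = "middleware"; · subst h13; decide
  by_cases h14 : seg = "admin"; · subst h14; decide
  have hs : ∀ k : String, seg ≠ k → (k == seg) = false := by
    intro k hk
    simp only [beq_eq_false_iff_ne, ne_eq]
    exact fun h => hk h.symm
  have hs2 : ∀ k : String, seg ≠ k → (seg == k) = false := by
    intro k hk
    simp only [beq_eq_false_iff_ne, ne_eq]
    exact hk
  simp only [PySem.Dict.getD, PySem.Dict.get?_mk_cons,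
    hs _ h1, hs _ h2, hs _ h3, hs _ h4, hs _ h5, hs _ h6, hs _ h7, hs _ h8, hs _ h9,
    hs _ h10, hs _ h11, hs _ h12, hs _ h13, hs _ h14,
    Bool.false_eq_true, if_false]
  simp only [pvAuthKeys, pvCfgKeys, pvSecKeys, List.contains_cons, List.contains_nil,
    hs2 _ h1, hs2 _ h2, hs2 _ h3, hs2 _ h4, hs2 _ h5, hs2 _ h6, hs2 _ h7, hs2 _ h8,
    hs2 _ h9, hs2 _ h10, hs2 _ h11, hs2 _ h12, hs2 _ h13, hs2 _ h14,
    Bool.or_false, Bool.false_eq_true, if_false]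
  rfl

-- a bit of the OR-fold is set iff some element sets it
theorem pvTestBit_foldl_or (f : String → Nat) (xs : List String) (m i : Nat) :
    ((xs.foldl (fun a s => a ||| f s) m).testBit i) =
      (m.testBit i || xs.any fun s => (f s).testBit i) := by
  induction xs generalizing m with
  | nil => simp
  | cons x xs ih =>
    simp only [List.foldl_cons, List.any_cons]
    rw [ih, Nat.testBit_or, Bool.or_assoc]

-- the four keyword groups are pairwise disjoint
theorem pvDisj12 (seg : String) (h : pvAuthKeys.contains seg = true) :
    pvCfgKeys.contains seg = false := by
  simp only [pvAuthKeys, List.contains_eq_mem, decide_eq_true_eq] at h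
  fin_cases h <;> decide
theorem pvDisj13 (seg : String) (h : pvAuthKeys.contains seg = true) :
    pvSecKeys.contains seg = false := by
  simp only [pvAuthKeys, List.contains_eq_mem, decide_eq_true_eq] at h
  fin_cases h <;> decide
theorem pvDisj14 (seg : String) (h : pvAuthKeys.contains seg = true) :
    (seg == "admin") = false := by
  simp only [pvAuthKeys, List.contains_eq_mem, decide_eq_true_eq] at h
  fin_cases h <;> decide
theorem pvDisj23 (seg : String) (h : pvCfgKeys.contains seg = true) :
    pvSecKeys.contains seg = false := by
  simp only [pvCfgKeys, List.contains_eq_mem, decide_eq_true_eq] at h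
  fin_cases h <;> decide
theorem pvDisj24 (seg : String) (h : pvCfgKeys.contains seg = true) :
    (seg == "admin") = false := by
  simp only [pvCfgKeys, List.contains_eq_mem, decide_eq_true_eq] at h
  fin_cases h <;> decide
theorem pvDisj34 (seg : String) (h : pvSecKeys.contains seg = true) :
    (seg == "admin") = false := by
  simp only [pvSecKeys, List.contains_eq_mem, decide_eq_true_eq] at h
  fin_cases h <;> decide

-- bits 0..3 of a keyword mask pick out the four keyword groups; bit 4 is never set
theorem pvKwBit_bit0 (seg : String) :
    (PySem.Dict.getD altKeywordBit seg 0).testBit 0 = pvAuthKeys.contains seg := by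
  rw [pvKwBit_eq]
  split_ifs with h1 h2 h3 h4 <;>
    first
      | (rw [h1]; decide)
      | (simp only [Bool.not_eq_true] at h1; rw [h1]; decide)
theorem pvKwBit_bit1 (seg : String) :
    (PySem.Dict.getD altKeywordBit seg 0).testBit 1 = pvCfgKeys.contains seg := by
  rw [pvKwBit_eq]
  split_ifs with h1 h2 h3 h4 <;>
    first
      | (rw [pvDisj12 seg h1]; decide)
      | (rw [h2]; decide)
      | (simp only [Bool.not_eq_true] at h2; rw [h2]; decide)
theorem pvKwBit_bit2 (seg : String) :
    (PySem.Dict.getD altKeywordBit seg 0).testBit 2 = pvSecKeys.contains seg := by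
  rw [pvKwBit_eq]
  split_ifs with h1 h2 h3 h4 <;>
    first
      | (rw [pvDisj13 seg h1]; decide)
      | (rw [pvDisj23 seg h2]; decide)
      | (rw [h3]; decide)
      | (simp only [Bool.not_eq_true] at h3; rw [h3]; decide)
theorem pvKwBit_bit3 (seg : String) :
    (PySem.Dict.getD altKeywordBit seg 0).testBit 3 = (seg == "admin") := by
  rw [pvKwBit_eq]
  split_ifs with h1 h2 h3 h4 <;>
    first
      | (rw [pvDisj14 seg h1]; decide)
      | (rw [pvDisj24 seg h2]; decide)
      | (rw [pvDisj34 seg h3]; decide)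
      | (rw [h4]; decide)
      | (simp only [Bool.not_eq_true] at h4; rw [h4]; decide)
theorem pvKwBit_bit4 (seg : String) :
    (PySem.Dict.getD altKeywordBit seg 0).testBit 4 = false := by
  rw [pvKwBit_eq]
  split_ifs <;> decide

-- mask & 2^i is nonzero exactly when bit i is set
theorem pvAndPow_ne (m i : Nat) : (m &&& 2 ^ i ≠ 0) ↔ m.testBit i = true := by
  rw [Nat.and_two_pow]
  rcases h : m.testBit i <;> simp

-- any(seg == "admin") is just membership
theorem pvAnyAdmin (segs : List String) :
    (segs.any fun seg => (seg == "admin")) = segs.contains "admin" := by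
  induction segs with
  | nil => rfl
  | cons x xs ih =>
    by_cases hx : x = "admin"
    · subst hx
      simp only [List.any_cons, List.contains_cons, ih, BEq.rfl, Bool.true_or]
    · have h1 : (x == "admin") = false := by
        simp only [beq_eq_false_iff_ne, ne_eq]
        exact hx
      have h2 : ("admin" == x) = false := by
        simp only [beq_eq_false_iff_ne, ne_eq]
        exact fun h => hx h.symm
      simp only [List.any_cons, List.contains_cons, ih, h1, h2]

-- ===== VERDICT (by name: the statement is the Claim_ definition above) =====
theorem infer_path_categories_spec : Claim_equal_infer_path_categories := by
  intro changed_paths _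
  unfold Spec_infer_path_categories infer_path_categories infer_path_categories_alt
  apply List.foldl_ext
  intro cats path _
  dsimp only
  -- name the lowered segments and the segment mask
  set segs := (PySem.Str.split? (PySem.Str.lower path) "/").getD [] with hsegs
  set m0 := segs.foldl (fun m seg => m ||| PySem.Dict.getD altKeywordBit seg 0) 0 with hm0
  -- characterize each bit of m0
  have hb0 : m0.testBit 0 = segs.any (fun seg => pvAuthKeys.contains seg) := by
    rw [hm0, pvTestBit_foldl_or]
    simp only [Nat.zero_testBit, Bool.false_or]
    rw [show (fun seg => (PySem.Dict.getD altKeywordBit seg 0).testBit 0)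
        = fun seg => pvAuthKeys.contains seg from funext pvKwBit_bit0]
  have hb1 : m0.testBit 1 = segs.any (fun seg => pvCfgKeys.contains seg) := by
    rw [hm0, pvTestBit_foldl_or]
    simp only [Nat.zero_testBit, Bool.false_or]
    rw [show (fun seg => (PySem.Dict.getD altKeywordBit seg 0).testBit 1)
        = fun seg => pvCfgKeys.contains seg from funext pvKwBit_bit1]
  have hb2 : m0.testBit 2 = segs.any (fun seg => pvSecKeys.contains seg) := by
    rw [hm0, pvTestBit_foldl_or]
    simp only [Nat.zero_testBit, Bool.false_or]
    rw [show (fun seg => (PySem.Dict.getD altKeywordBit seg 0).testBit 2)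
        = fun seg => pvSecKeys.contains seg from funext pvKwBit_bit2]
  have hb3 : m0.testBit 3 = segs.contains "admin" := by
    rw [hm0, pvTestBit_foldl_or]
    simp only [Nat.zero_testBit, Bool.false_or]
    rw [← pvAnyAdmin segs]
    rw [show (fun seg => (PySem.Dict.getD altKeywordBit seg 0).testBit 3)
        = fun seg => (seg == "admin") from funext pvKwBit_bit3]
  have hb4 : m0.testBit 4 = false := by
    rw [hm0, pvTestBit_foldl_or]
    simp only [Nat.zero_testBit, Bool.false_or, List.any_eq_false]
    intro s _
    simp [pvKwBit_bit4 s]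
  -- the dependency condition of A, via pvBase_eq/pvDep_eq
  have hdep : PySem.Set.contains altDepBasenames ((PySem.List.pyGet? segs (-1)).getD "") =
      pvDepFiles.contains (if PySem.Str.isIn "/" path then
        PySem.Str.lower ((PySem.List.pyGet? ((PySem.Str.split? path "/").getD []) (-1)).getD "")
      else PySem.Str.lower path) := by
    rw [pvDep_eq, hsegs, pvBase_eq]
  -- full mask
  set dep := PySem.Set.contains altDepBasenames ((PySem.List.pyGet? segs (-1)).getD "") with hd
  set m := (if dep = true then m0 ||| 16 else m0) with hm
  have hmb : ∀ i, i < 4 → m.testBit i = m0.testBit i := by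
    intro i hi
    rw [hm]
    have h16 : ∀ j, j < 4 → Nat.testBit 16 j = false := by decide
    split_ifs with h
    · rw [Nat.testBit_or, h16 i hi, Bool.or_false]
    · rfl
  have hmb4 : m.testBit 4 = dep := by
    rw [hm]
    rcases h : dep <;>
      simp [Nat.testBit_or, hb4, show Nat.testBit 16 4 = true from rfl]
  -- unfold B's decode loop into five ifs and rewrite each condition
  simp only [altBitCategories, List.foldl_cons, List.foldl_nil, PySem.Set.update]
  have c1 : (m &&& 1 ≠ 0) = (segs.any (fun seg => pvAuthKeys.contains seg) = true) := by
    rw [show (1 : Nat) = 2 ^ 0 from rfl]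
    rw [eq_iff_iff, pvAndPow_ne, hmb 0 (by omega), hb0]
  have c2 : (m &&& 2 ≠ 0) = (segs.any (fun seg => pvCfgKeys.contains seg) = true) := by
    rw [show (2 : Nat) = 2 ^ 1 from rfl]
    rw [eq_iff_iff, pvAndPow_ne, hmb 1 (by omega), hb1]
  have c3 : (m &&& 4 ≠ 0) = (segs.any (fun seg => pvSecKeys.contains seg) = true) := by
    rw [show (4 : Nat) = 2 ^ 2 from rfl]
    rw [eq_iff_iff, pvAndPow_ne, hmb 2 (by omega), hb2]
  have c4 : (m &&& 8 ≠ 0) = (segs.contains "admin" = true) := by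
    rw [show (8 : Nat) = 2 ^ 3 from rfl]
    rw [eq_iff_iff, pvAndPow_ne, hmb 3 (by omega), hb3]
  have c5 : (m &&& 16 ≠ 0) = (dep = true) := by
    rw [show (16 : Nat) = 2 ^ 4 from rfl]
    rw [eq_iff_iff, pvAndPow_ne, hmb4]
  simp only [c1, c2, c3, c4, c5]
  rw [hdep]
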